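-- pv_equiv track=rewrite | github.com/TooVerletzt/hopfield | hopfield.py | entrenar
-- ===== SOURCE A (Python) =====
-- def producto_externo(v):   # N x N con 2 for (v[i]*v[j])
--     n = len(v)
--     M = []
--     i = 0
--     while i < n:
--         fila = []
--         j = 0
--         while j < n:
--             fila.append(v[i] * v[j])
--             j += 1
--         M.append(fila)
--         i += 1
--     return M
--
-- def sumar_matrices(A, B):
--     n = len(A)
--     C = []
--     i = 0
--     while i < n:
--         fila = []
--         j = 0
--         while j < n:
--             fila.append(A[i][j] + B[i][j])
--             j += 1
--         C.append(fila)
--         i += 1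
--     return C
--
-- def diagonal_cero(M):
--     i = 0
--     while i < len(M):
--         M[i][i] = 0
--         i += 1
--     return M
--
-- def entrenar(patrones):
--     # Suma de productos externos y diagonal=0
--     n = len(patrones[0])
--     # S = 0
--     S = []
--     i = 0
--     while i < n:
--         fila = []
--         j = 0
--         while j < n:
--             fila.append(0)
--             j += 1
--         S.append(fila)
--         i += 1
--
--     # acumular X^T·X de cada patrón
--     p = 0
--     while p < len(patrones):
--         OP = producto_externo(patrones[p])
--         S = sumar_matrices(S, OP)
--         p += 1
--
--     # T = S con diagonal en 0
--     T = []
--     i = 0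
--     while i < n:
--         fila = []
--         j = 0
--         while j < n:
--             fila.append(S[i][j])
--             j += 1
--         T.append(fila)
--         i += 1
--     diagonal_cero(T)
--     return T
-- ===== SOURCE B (Python) =====
-- def entrenar(patrones):
--     # Direct cell-wise computation: no intermediate outer-product / sum matrices.
--     n = len(patrones[0])
--     T = []
--     for i in range(n):
--         fila = []
--         for j in range(n):
--             if i == j:
--                 fila.append(0)
--             else:
--                 acc = 0
--                 for p in patrones:
--                     acc += p[i] * p[j]
--                 fila.append(acc)
--         T.append(fila)
--     return T
-- ===== Notes on version B (the rewrite author's own statement) =====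
-- stated objective: simpler
-- what changed: Replaces the helper-based pipeline (build zero matrix, add full outer-product matrices per pattern, copy, zero diagonal) by one direct triple loop computing each cell as a sum over patterns, with the diagonal written as 0 immediately.
import Mathlib
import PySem

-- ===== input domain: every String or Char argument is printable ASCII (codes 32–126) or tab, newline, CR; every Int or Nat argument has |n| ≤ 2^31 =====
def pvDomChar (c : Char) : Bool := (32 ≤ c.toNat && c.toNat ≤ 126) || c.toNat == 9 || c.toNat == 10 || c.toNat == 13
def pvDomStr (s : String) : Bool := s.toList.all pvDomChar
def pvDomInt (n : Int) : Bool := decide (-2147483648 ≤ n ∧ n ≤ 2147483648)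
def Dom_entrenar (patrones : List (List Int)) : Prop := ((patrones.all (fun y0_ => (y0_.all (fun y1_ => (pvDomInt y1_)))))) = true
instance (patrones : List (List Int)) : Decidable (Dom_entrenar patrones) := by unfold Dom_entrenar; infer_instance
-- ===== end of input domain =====

-- B replaces A's helper pipeline (zero matrix + summed outer-product matrices + copy + zero-diagonal pass)
-- by one direct cell-wise triple loop; objective: simpler, same cost.


-- ===== PORT A =====
def producto_externo (v : List Int) : List (List Int) :=
  (List.range v.length).map (fun i => (List.range v.length).map (fun j => v.getD i 0 * v.getD j 0))

def sumar_matrices (A B : List (List Int)) : List (List Int) :=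
  (List.range A.length).map (fun i => (List.range A.length).map (fun j =>
    (A.getD i []).getD j 0 + (B.getD i []).getD j 0))

def diagonal_cero (M : List (List Int)) : List (List Int) :=
  (List.range M.length).foldl (fun M i => M.set i ((M.getD i []).set i 0)) M

def entrenar (patrones : List (List Int)) : List (List Int) :=
  let n := (patrones.getD 0 []).length
  let S0 := (List.range n).map (fun _ => (List.range n).map (fun _ => (0 : Int)))
  let S := patrones.foldl (fun S v => sumar_matrices S (producto_externo v)) S0
  let T := (List.range n).map (fun i => (List.range n).map (fun j => (S.getD i []).getD j 0))
  diagonal_cero T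

-- ===== PORT B =====
def entrenar_alt (patrones : List (List Int)) : List (List Int) :=
  let n := (patrones.getD 0 []).length
  (List.range n).map (fun i => (List.range n).map (fun j =>
    if i = j then (0 : Int)
    else patrones.foldl (fun acc p => acc + p.getD i 0 * p.getD j 0) 0))

-- ===== PRECONDITION & SPEC =====
-- Pre_ excludes exactly the inputs on which A raises IndexError: the empty pattern list
-- (patrones[0]) and pattern lists where some pattern is shorter than the first one.
def Pre_entrenar (patrones : List (List Int)) : Prop :=
  patrones ≠ [] ∧ ∀ v ∈ patrones, (patrones.headD []).length ≤ v.length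
instance (patrones : List (List Int)) : Decidable (Pre_entrenar patrones) := by
  unfold Pre_entrenar; infer_instance
def pvWitness_entrenar : List (List Int) := [[1, -1], [-1, 1]]

def Spec_entrenar (patrones : List (List Int)) (out : List (List Int)) : Prop := out = entrenar_alt patrones
instance (patrones : List (List Int)) (out : List (List Int)) : Decidable (Spec_entrenar patrones out) := by unfold Spec_entrenar; infer_instance

-- ===== CLAIM (what is proved, stated in full; the proofs are below) =====
def Claim_equal_entrenar : Prop := ∀ (patrones : List (List Int)), Dom_entrenar patrones → Pre_entrenar patrones → Spec_entrenar patrones (entrenar patrones)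

-- ===== LEMMAS AND PROOFS =====

/-- An `n × n` matrix given by a cell function. -/
def matMk (n : Nat) (f : Nat → Nat → Int) : List (List Int) :=
  (List.range n).map (fun i => (List.range n).map (fun j => f i j))

theorem length_matMk (n : Nat) (f : Nat → Nat → Int) : (matMk n f).length = n := by
  simp [matMk]

theorem matMk_congr {n : Nat} {f g : Nat → Nat → Int}
    (h : ∀ i < n, ∀ j < n, f i j = g i j) : matMk n f = matMk n g := by
  unfold matMk
  refine List.map_congr_left (fun i hi => ?_)
  exact List.map_congr_left (fun j hj => h i (List.mem_range.mp hi) j (List.mem_range.mp hj))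

theorem getD_matMk (n : Nat) (f : Nat → Nat → Int) (i : Nat) (hi : i < n) :
    (matMk n f).getD i [] = (List.range n).map (fun j => f i j) := by
  simp [matMk, List.getD, hi]

theorem cell_matMk (n : Nat) (f : Nat → Nat → Int) (i j : Nat) (hi : i < n) (hj : j < n) :
    ((matMk n f).getD i []).getD j 0 = f i j := by
  rw [getD_matMk n f i hi]
  simp [List.getD, hj]

theorem cell_producto_externo (v : List Int) (i j : Nat) :
    ((producto_externo v).getD i []).getD j 0 = v.getD i 0 * v.getD j 0 := by
  by_cases hi : i < v.length
  · rw [show producto_externo v = matMk v.length (fun i j => v.getD i 0 * v.getD j 0) from rfl,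
      getD_matMk _ _ i hi]
    by_cases hj : j < v.length
    · simp [List.getD, hj]
    · have hv : v.getD j 0 = 0 := by
        simp [List.getD, List.getElem?_eq_none (by omega : v.length ≤ j)]
      simp [List.getD, Nat.not_lt.mp hj]
  · have h1 : (producto_externo v).getD i [] = [] := by
      apply List.getD_eq_default
      simpa [producto_externo] using Nat.not_lt.mp hi
    have hv : v.getD i 0 = 0 := by
      simp [List.getD, List.getElem?_eq_none (by omega : v.length ≤ i)]
    rw [h1, hv]
    simp

theorem sumar_matMk (n : Nat) (g : Nat → Nat → Int) (B : List (List Int)) :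
    sumar_matrices (matMk n g) B = matMk n (fun i j => g i j + (B.getD i []).getD j 0) := by
  unfold sumar_matrices
  rw [length_matMk]
  exact matMk_congr (fun i hi j hj => by rw [cell_matMk n g i j hi hj])

theorem fold_sumar (n : Nat) (ps : List (List Int)) :
    ∀ g : Nat → Nat → Int,
      ps.foldl (fun S v => sumar_matrices S (producto_externo v)) (matMk n g)
        = matMk n (fun i j => ps.foldl (fun acc v => acc + v.getD i 0 * v.getD j 0) (g i j)) := by
  induction ps with
  | nil => intro g; simp [List.foldl]
  | cons v ps ih =>
    intro g
    simp only [List.foldl_cons]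
    rw [sumar_matMk]
    rw [ih (fun i j => g i j + ((producto_externo v).getD i []).getD j 0)]
    exact matMk_congr (fun i _ j _ => by rw [cell_producto_externo])

theorem set_map_range {α : Type} (n i : Nat) (h : Nat → α) (x : α) :
    ((List.range n).map h).set i x = (List.range n).map (fun k => if k = i then x else h k) := by
  apply List.ext_getElem
  · simp
  · intro k h1 h2
    by_cases hk : i = k
    · subst hk; simp
    · simp [hk, Ne.symm hk]

theorem step_matMk (n i : Nat) (g : Nat → Nat → Int) :
    (matMk n g).set i (((matMk n g).getD i []).set i 0)
      = matMk n (fun i' j => if i' = i ∧ j = i then 0 else g i' j) := by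
  by_cases hi : i < n
  · rw [getD_matMk n g i hi]
    unfold matMk
    rw [set_map_range, set_map_range]
    refine List.map_congr_left (fun i' _ => ?_)
    by_cases h' : i' = i
    · rw [if_pos h']
      refine List.map_congr_left (fun j _ => ?_)
      by_cases hj : j = i <;> simp [h', hj]
    · rw [if_neg h']
      refine List.map_congr_left (fun j _ => ?_)
      simp [h']
  · have : (matMk n g).length ≤ i := by rw [length_matMk]; omega
    rw [List.set_eq_of_length_le this]
    exact matMk_congr (fun i' hi' j _ => by
      have : i' ≠ i := by omega
      simp [this])

theorem diag_fold (n : Nat) (l : List Nat) :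
    ∀ g : Nat → Nat → Int,
      l.foldl (fun M i => M.set i ((M.getD i []).set i 0)) (matMk n g)
        = matMk n (fun i j => if i ∈ l ∧ j = i then 0 else g i j) := by
  induction l with
  | nil => intro g; simp
  | cons a l ih =>
    intro g
    simp only [List.foldl_cons]
    rw [step_matMk, ih]
    refine matMk_congr (fun i _ j _ => ?_)
    simp only [List.mem_cons]
    by_cases h1 : i ∈ l ∧ j = i
    · rw [if_pos h1, if_pos ⟨Or.inr h1.1, h1.2⟩]
    · rw [if_neg h1]
      by_cases h2 : i = a ∧ j = a
      · rw [if_pos h2, if_pos ⟨Or.inl h2.1, h2.2.trans h2.1.symm⟩]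
      · have h3 : ¬((i = a ∨ i ∈ l) ∧ j = i) := by
          rintro ⟨h | h, rfl⟩
          · exact h2 ⟨h, h⟩
          · exact h1 ⟨h, rfl⟩
        rw [if_neg h2, if_neg h3]

theorem diagonal_cero_matMk (n : Nat) (f : Nat → Nat → Int) :
    diagonal_cero (matMk n f) = matMk n (fun i j => if i = j then 0 else f i j) := by
  unfold diagonal_cero
  rw [length_matMk, diag_fold]
  refine matMk_congr (fun i hi j hj => ?_)
  by_cases h : i = j
  · rw [if_pos ⟨List.mem_range.mpr hi, h.symm⟩, if_pos h]
  · have h3 : ¬(i ∈ List.range n ∧ j = i) := by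
      rintro ⟨_, rfl⟩; exact h rfl
    rw [if_neg h3, if_neg h]

-- ===== VERDICT (by name: the statement is the Claim_ definition above) =====
theorem entrenar_spec : Claim_equal_entrenar := by
  intro patrones _ _
  show entrenar patrones = entrenar_alt patrones
  have hA : entrenar patrones
      = diagonal_cero (matMk (patrones.getD 0 []).length (fun i j =>
          (((patrones.foldl (fun S v => sumar_matrices S (producto_externo v))
              (matMk (patrones.getD 0 []).length (fun _ _ => 0))).getD i []).getD j 0))) := rfl
  have hB : entrenar_alt patrones
      = matMk (patrones.getD 0 []).length (fun i j => if i = j then 0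
          else patrones.foldl (fun acc p => acc + p.getD i 0 * p.getD j 0) 0) := rfl
  rw [hA, hB]
  simp only [fold_sumar]
  rw [diagonal_cero_matMk]
  refine matMk_congr (fun i hi j hj => ?_)
  by_cases h : i = j
  · rw [if_pos h, if_pos h]
  · rw [if_neg h, if_neg h, cell_matMk _ _ i j hi hj]
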